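-- pv_equiv track=rewrite | github.com/timursotnicov/Telegram-Info-Bot | savebot/services/ai_classifier.py | _category_key
-- ===== SOURCE A (Python) =====
-- import unicodedata
--
-- def _category_key(value: str | None) -> str:
--     """Normalize category names for comparison without emoji/punctuation noise."""
--     if not value:
--         return ""
--     chars = []
--     for char in str(value).strip():
--         category = unicodedata.category(char)
--         if category[0] in {"P", "S"}:
--             chars.append(" ")
--         else:
--             chars.append(char)
--     return " ".join("".join(chars).casefold().split())
-- ===== SOURCE B (Python) =====
-- import unicodedata
--
-- def _category_key(value):
--     """Single-pass tokenizer: split into words directly, flushing a buffer at P/S or whitespace boundaries."""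
--     if not value:
--         return ""
--     words = []
--     word = []
--     for ch in str(value):
--         if unicodedata.category(ch)[0] in {"P", "S"} or ch.isspace():
--             if word:
--                 words.append("".join(word).casefold())
--                 word = []
--         else:
--             word.append(ch)
--     if word:
--         words.append("".join(word).casefold())
--     return " ".join(words)
-- ===== Notes on version B (the rewrite author's own statement) =====
-- stated objective: alternative
-- what changed: B replaces A's replace-punctuation-with-space / casefold / str.split / re-join pipeline by a single pass over the characters that maintains a word buffer and word list, flushing the casefolded buffer at each P/S-or-whitespace boundary.
import Mathlib
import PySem

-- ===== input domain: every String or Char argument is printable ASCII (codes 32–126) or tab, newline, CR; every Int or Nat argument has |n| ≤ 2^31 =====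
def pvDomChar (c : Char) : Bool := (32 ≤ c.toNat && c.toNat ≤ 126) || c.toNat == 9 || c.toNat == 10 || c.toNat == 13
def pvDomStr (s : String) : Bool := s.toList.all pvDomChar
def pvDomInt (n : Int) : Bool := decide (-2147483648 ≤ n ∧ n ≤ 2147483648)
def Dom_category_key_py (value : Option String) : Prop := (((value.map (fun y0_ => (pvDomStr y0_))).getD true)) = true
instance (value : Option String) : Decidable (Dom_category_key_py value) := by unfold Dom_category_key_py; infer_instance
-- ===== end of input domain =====

-- B normalizes in one pass with a word buffer and word list instead of A's replace-then-casefold-then-split pipeline (objective: alternative decomposition, same cost).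

-- ===== PORT A =====
-- unicodedata.category(c)[0] ∈ {"P","S"}: exact on the printable-ASCII + tab/newline/CR domain,
-- where the P/S-category characters are exactly the printable non-alphanumeric non-space ones.
def pvIsPS (c : Char) : Bool :=
  (33 ≤ c.toNat && c.toNat ≤ 126) &&
    !((48 ≤ c.toNat && c.toNat ≤ 57) || (65 ≤ c.toNat && c.toNat ≤ 90) || (97 ≤ c.toNat && c.toNat ≤ 122))

-- str.casefold() is ported as PySem.Chars.lower: exact on the ASCII domain.
def category_key_py (value : Option String) : String :=
  match value with
  | none => ""
  | some s =>
    if s = "" then ""                       -- `if not value`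
    else
      let chars : List Char := (PySem.Chars.strip s.toList).foldl
        (fun acc c => acc ++ [if pvIsPS c then ' ' else c]) []
      String.ofList (PySem.Chars.join [' '] (PySem.Chars.split₀ (PySem.Chars.lower chars)))

-- ===== PORT B =====
-- flush: `if word: words.append("".join(word).casefold())` (casefold ported as lower, exact on ASCII)
def pvFlush (words : List (List Char)) (word : List Char) : List (List Char) :=
  if word.isEmpty then words else words ++ [PySem.Chars.lower word]

-- one loop step of B: a P/S or whitespace boundary flushes the buffer, other characters extend it
def pvStepB (st : List (List Char) × List Char) (c : Char) : List (List Char) × List Char :=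
  if pvIsPS c || PySem.Chars.isspace c then (pvFlush st.1 st.2, []) else (st.1, st.2 ++ [c])

def category_key_py_alt (value : Option String) : String :=
  match value with
  | none => ""
  | some s =>
    if s = "" then ""                       -- `if not value`
    else
      let st := s.toList.foldl pvStepB ([], [])
      String.ofList (PySem.Chars.join [' '] (pvFlush st.1 st.2))

-- ===== PRECONDITION & SPEC =====
def Spec_category_key_py (value : Option String) (out : String) : Prop := out = category_key_py_alt value
instance (value : Option String) (out : String) : Decidable (Spec_category_key_py value out) := by unfold Spec_category_key_py; infer_instance

-- ===== CLAIM (what is proved, stated in full; the proofs are below) =====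
def Claim_equal_category_key_py : Prop := ∀ (value : Option String), Dom_category_key_py value → Spec_category_key_py value (category_key_py value)

-- ===== LEMMAS AND PROOFS =====

-- the combined per-character map A applies: P/S → ' ', then casefold
def pvM (c : Char) : Char := PySem.Chars.lowerChar (if pvIsPS c then ' ' else c)

-- B's boundary predicate
def pvBnd (c : Char) : Bool := pvIsPS c || PySem.Chars.isspace c

lemma pvCharLe (a b : Char) : (a ≤ b) ↔ a.toNat ≤ b.toNat :=
  Char.le_def.trans UInt32.le_iff_toNat_le

-- A's map fixes the whitespace characters of the domain
lemma pvM_space {c : Char} (hs : PySem.Chars.isspace c = true) (hd : pvDomChar c = true) :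
    pvM c = c := by
  have hn : c.toNat = 9 ∨ c.toNat = 10 ∨ c.toNat = 13 ∨ c.toNat = 32 := by
    simp [PySem.Chars.isspace] at hs
    simp [pvDomChar] at hd
    omega
  have hps : pvIsPS c = false := by simp [pvIsPS]; omega
  have hup : PySem.Chars.isupper c = false := by
    simp [PySem.Chars.isupper, pvCharLe]
    omega
  simp [pvM, hps, PySem.Chars.lowerChar, hup]

-- after A's map, a character is whitespace exactly where B sees a word boundary
lemma pvIsspace_pvM (c : Char) : PySem.Chars.isspace (pvM c) = pvBnd c := by
  unfold pvM pvBnd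
  by_cases hps : pvIsPS c = true
  · simp [hps]
    decide
  · simp only [Bool.not_eq_true] at hps
    simp only [hps, Bool.false_or]
    by_cases hup : PySem.Chars.isupper c = true
    · have hb : 65 ≤ c.toNat ∧ c.toNat ≤ 90 := by
        simpa [PySem.Chars.isupper, pvCharLe] using hup
      have hval : (c.toNat + 32).isValidChar := Or.inl (by omega)
      have hl : PySem.Chars.isspace (PySem.Chars.lowerChar c) = false := by
        simp [PySem.Chars.lowerChar, hup, PySem.Chars.isspace, Char.toNat_ofNat, hval]
        omega
      have hr : PySem.Chars.isspace c = false := by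
        simp [PySem.Chars.isspace]
        omega
      simp [hl, hr]
    · simp only [Bool.not_eq_true] at hup
      simp [PySem.Chars.lowerChar, hup]

-- unfolding equations of split₀'s worker
lemma pvGo_cons (w : Char) (ws cur : List Char) (acc : List (List Char)) :
    PySem.Chars.split₀.go (w :: ws) cur acc =
      if PySem.Chars.isspace w = true then
        (if cur.isEmpty = true then PySem.Chars.split₀.go ws [] acc
         else PySem.Chars.split₀.go ws [] (cur.reverse :: acc))
      else PySem.Chars.split₀.go ws (w :: cur) acc := by
  rw [PySem.Chars.split₀.go]

lemma pvGo_nil (cur : List Char) (acc : List (List Char)) :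
    PySem.Chars.split₀.go [] cur acc =
      (if cur.isEmpty = true then acc.reverse else (cur.reverse :: acc).reverse) := by
  rw [PySem.Chars.split₀.go]

-- B's single pass computes split₀ of A's mapped character list
lemma pvGoB : ∀ (cs buf : List Char) (ws : List (List Char)),
    PySem.Chars.split₀.go (cs.map pvM) (PySem.Chars.lower buf).reverse ws.reverse
      = pvFlush (cs.foldl pvStepB (ws, buf)).1 (cs.foldl pvStepB (ws, buf)).2 := by
  intro cs
  induction cs with
  | nil =>
    intro buf ws
    rw [List.map_nil, List.foldl_nil, PySem.Chars.split₀.go]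
    cases buf with
    | nil => simp [pvFlush, PySem.Chars.lower]
    | cons b bs =>
      simp [pvFlush, PySem.Chars.lower]
  | cons c cs ih =>
    intro buf ws
    rw [List.map_cons, List.foldl_cons, PySem.Chars.split₀.go, pvIsspace_pvM]
    show (if pvBnd c = true then _ else _) = _
    by_cases hb : pvBnd c = true
    · rw [if_pos hb]
      have hstep : pvStepB (ws, buf) c = (pvFlush ws buf, []) := by
        simp [pvStepB, pvBnd] at hb ⊢
        rcases hb with h | h <;> simp [h]
      rw [hstep]
      cases buf with
      | nil =>
        simp only [PySem.Chars.lower, List.map_nil, List.reverse_nil, List.isEmpty_nil, if_pos]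
        have := ih [] ws
        simpa only [show PySem.Chars.lower [] = ([] : List Char) from rfl, List.reverse_nil,
          pvFlush, List.isEmpty_nil, if_pos] using this
      | cons b bs =>
        have hfl : pvFlush ws (b :: bs) = ws ++ [PySem.Chars.lower (b :: bs)] := by
          simp [pvFlush]
        rw [hfl, if_neg (by simp [PySem.Chars.lower])]
        have := ih [] (ws ++ [PySem.Chars.lower (b :: bs)])
        simp only [show PySem.Chars.lower [] = ([] : List Char) from rfl, List.reverse_nil] at this
        rw [← this]
        congr 1
        simp [PySem.Chars.lower, List.reverse_append]
    · rw [if_neg hb]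
      have hps : pvIsPS c = false := by
        simp [pvBnd] at hb; exact hb.1
      have hstep : pvStepB (ws, buf) c = (ws, buf ++ [c]) := by
        simp [pvStepB, pvBnd] at hb ⊢
        simp [hb.1, hb.2]
      rw [hstep]
      have := ih (buf ++ [c]) ws
      rw [← this]
      congr 1
      simp [pvM, hps, PySem.Chars.lower]

lemma pvGo_ws_nil : ∀ (ws cur : List Char) (acc : List (List Char)),
    (∀ c ∈ ws, PySem.Chars.isspace c = true) →
    PySem.Chars.split₀.go ws cur acc = PySem.Chars.split₀.go [] cur acc := by
  intro ws
  induction ws with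
  | nil => intro cur acc _; rfl
  | cons w ws ih =>
    intro cur acc h
    have hw : PySem.Chars.isspace w = true := h w (by simp)
    have hws : ∀ c ∈ ws, PySem.Chars.isspace c = true := fun c hc => h c (by simp [hc])
    rw [pvGo_cons, if_pos hw]
    by_cases hc : cur.isEmpty = true
    · rw [if_pos hc, ih [] acc hws, pvGo_nil, pvGo_nil]
      simp [hc]
    · rw [if_neg hc, ih [] (cur.reverse :: acc) hws, pvGo_nil, pvGo_nil]
      simp only [List.isEmpty_nil, if_pos]
      rw [if_neg hc]

lemma pvGo_append_ws : ∀ (x ws cur : List Char) (acc : List (List Char)),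
    (∀ c ∈ ws, PySem.Chars.isspace c = true) →
    PySem.Chars.split₀.go (x ++ ws) cur acc = PySem.Chars.split₀.go x cur acc := by
  intro x
  induction x with
  | nil => intro ws cur acc h; exact pvGo_ws_nil ws cur acc h
  | cons c x ih =>
    intro ws cur acc h
    rw [List.cons_append, pvGo_cons]
    by_cases hc : PySem.Chars.isspace c = true
    · rw [if_pos hc]
      by_cases he : cur.isEmpty = true
      · rw [if_pos he, ih ws [] acc h, pvGo_cons, if_pos hc, if_pos he]
      · rw [if_neg he, ih ws [] (cur.reverse :: acc) h, pvGo_cons, if_pos hc, if_neg he]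
    · rw [if_neg hc, ih ws (c :: cur) acc h, pvGo_cons, if_neg hc]

lemma pvSplit_ws_prefix : ∀ (ws x : List Char),
    (∀ c ∈ ws, PySem.Chars.isspace c = true) →
    PySem.Chars.split₀ (ws ++ x) = PySem.Chars.split₀ x := by
  intro ws
  induction ws with
  | nil => intro x _; rfl
  | cons w ws ih =>
    intro x h
    have hw : PySem.Chars.isspace w = true := h w (by simp)
    unfold PySem.Chars.split₀
    rw [List.cons_append, pvGo_cons, if_pos hw]
    simp only [List.isEmpty_nil, if_pos]
    exact ih x (fun c hc => h c (by simp [hc]))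

-- stripping before mapping does not change the resulting words
lemma pvSplit_map_strip (cs : List Char) (hd : ∀ c ∈ cs, pvDomChar c = true) :
    PySem.Chars.split₀ (List.map pvM (PySem.Chars.strip cs)) = PySem.Chars.split₀ (List.map pvM cs) := by
  -- cs = tw ++ lstrip cs and lstrip cs = strip cs ++ tw2, with tw, tw2 whitespace
  have h1 : List.takeWhile PySem.Chars.isspace cs ++ PySem.Chars.lstrip cs = cs := by
    simp [PySem.Chars.lstrip]
  have h2 : PySem.Chars.strip cs ++ (List.takeWhile PySem.Chars.isspace (PySem.Chars.lstrip cs).reverse).reverse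
      = PySem.Chars.lstrip cs := by
    show (List.dropWhile PySem.Chars.isspace (PySem.Chars.lstrip cs).reverse).reverse
        ++ (List.takeWhile PySem.Chars.isspace (PySem.Chars.lstrip cs).reverse).reverse
        = PySem.Chars.lstrip cs
    rw [← List.reverse_append, List.takeWhile_append_dropWhile, List.reverse_reverse]
  set tw := List.takeWhile PySem.Chars.isspace cs with htw
  set tw2 := (List.takeWhile PySem.Chars.isspace (PySem.Chars.lstrip cs).reverse).reverse with htw2
  have htws : ∀ c ∈ tw, PySem.Chars.isspace c = true := fun c hc => List.mem_takeWhile_imp hc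
  have htwmem : ∀ c ∈ tw, c ∈ cs := fun c hc => (List.takeWhile_sublist _).mem hc
  have htw2s : ∀ c ∈ tw2, PySem.Chars.isspace c = true := by
    intro c hc
    rw [htw2, List.mem_reverse] at hc
    exact List.mem_takeWhile_imp hc
  have htw2mem : ∀ c ∈ tw2, c ∈ cs := by
    intro c hc
    rw [htw2, List.mem_reverse] at hc
    have : c ∈ (PySem.Chars.lstrip cs).reverse := (List.takeWhile_sublist _).mem hc
    rw [List.mem_reverse] at this
    exact (List.dropWhile_sublist _).mem (by simpa [PySem.Chars.lstrip] using this)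
  have hmapid : ∀ (l : List Char), (∀ c ∈ l, PySem.Chars.isspace c = true) → (∀ c ∈ l, c ∈ cs) →
      List.map pvM l = l := by
    intro l hs hm
    have := List.map_congr_left (f := pvM) (g := fun c => c)
      (fun c hc => pvM_space (hs c hc) (hd c (hm c hc)))
    simpa using this
  calc PySem.Chars.split₀ (List.map pvM (PySem.Chars.strip cs))
      = PySem.Chars.split₀ (List.map pvM (PySem.Chars.strip cs) ++ tw2) := by
        unfold PySem.Chars.split₀
        rw [pvGo_append_ws _ tw2 [] [] htw2s]
    _ = PySem.Chars.split₀ (List.map pvM (PySem.Chars.strip cs ++ tw2)) := by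
        rw [List.map_append, hmapid tw2 htw2s htw2mem]
    _ = PySem.Chars.split₀ (tw ++ List.map pvM (PySem.Chars.lstrip cs)) := by
        rw [h2]
        rw [pvSplit_ws_prefix tw _ htws]
    _ = PySem.Chars.split₀ (List.map pvM (tw ++ PySem.Chars.lstrip cs)) := by
        rw [List.map_append, hmapid tw htws htwmem]
    _ = PySem.Chars.split₀ (List.map pvM cs) := by rw [h1]

-- ===== VERDICT (by name: the statement is the Claim_ definition above) =====
theorem category_key_py_spec : Claim_equal_category_key_py := by
  intro value hdom
  unfold Spec_category_key_py
  match value with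
  | none => rfl
  | some s =>
    by_cases hs : s = ""
    · simp [category_key_py, category_key_py_alt, hs]
    · have hd : ∀ c ∈ s.toList, pvDomChar c = true := by
        simp only [Dom_category_key_py, Option.map_some, Option.getD_some, pvDomStr,
          List.all_eq_true] at hdom
        exact hdom
      simp only [category_key_py, category_key_py_alt, if_neg hs]
      have hA : PySem.Chars.lower ((PySem.Chars.strip s.toList).foldl
          (fun acc c => acc ++ [if pvIsPS c then ' ' else c]) [])
          = List.map pvM (PySem.Chars.strip s.toList) := by
        rw [PySem.List.foldl_append_singleton_eq_map]
        simp only [List.nil_append, PySem.Chars.lower, List.map_map]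
        rfl
      have hB : PySem.Chars.split₀ (List.map pvM s.toList)
          = pvFlush (s.toList.foldl pvStepB ([], [])).1 (s.toList.foldl pvStepB ([], [])).2 :=
        pvGoB s.toList [] []
      rw [hA, pvSplit_map_strip s.toList hd, hB]
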